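-- pv_equiv track=rewrite | github.com/Talessseed/tipeCrypto | Algos/Tests de primalite/tests de primalite.py | J_reducePowTwo
-- ===== SOURCE A (Python) =====
-- def J_getPowTwoVal(n):
--     if n % 8 == 3 or n % 8 == 5:
--         return -1
--     return 1
--
-- def J_reducePowTwo(j):
--     k = 0
--     (sign, m, n) = j
--     while m & 1 == 0:
--         m = m >> 1
--         k += 1
--     if k % 2 == 0:
--         return (sign, m, n)
--     return (J_getPowTwoVal(n)*sign, m, n)
-- ===== SOURCE B (Python) =====
-- # B: no loop at all -- the lowest set bit is isolated with the m & -m trick,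
-- # its position k read off with bit_length, m shifted down in one step.
-- def J_getPowTwoVal(n):
--     if n % 8 == 3 or n % 8 == 5:
--         return -1
--     return 1
--
-- def J_reducePowTwo(j):
--     (sign, m, n) = j
--     k = (m & -m).bit_length() - 1
--     m >>= k
--     if k & 1:
--         return (J_getPowTwoVal(n) * sign, m, n)
--     return (sign, m, n)
-- ===== Notes on version B (the rewrite author's own statement) =====
-- stated objective: simpler
-- what changed: B replaces A's one-bit-at-a-time while loop and shift counter by a loop-free closed form: it isolates the lowest set bit with m & -m, reads its position k with bit_length, shifts m down by k in one step and tests k & 1.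
import Mathlib
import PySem

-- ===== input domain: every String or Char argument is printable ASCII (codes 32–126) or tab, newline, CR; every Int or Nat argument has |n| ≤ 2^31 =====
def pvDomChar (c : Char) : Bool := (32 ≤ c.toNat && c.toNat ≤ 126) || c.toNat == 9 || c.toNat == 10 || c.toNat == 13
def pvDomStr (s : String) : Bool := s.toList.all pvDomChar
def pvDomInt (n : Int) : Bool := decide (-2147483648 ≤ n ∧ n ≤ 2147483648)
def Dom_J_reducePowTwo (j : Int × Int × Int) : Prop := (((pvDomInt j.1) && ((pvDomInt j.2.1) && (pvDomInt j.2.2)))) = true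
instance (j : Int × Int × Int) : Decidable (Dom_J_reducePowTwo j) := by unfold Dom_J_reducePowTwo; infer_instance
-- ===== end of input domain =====

-- B replaces A's one-bit-at-a-time while loop by a loop-free closed form:
-- m & -m isolates the lowest set bit, bit_length reads its position k,
-- m is shifted down by k in one step and the sign flip is decided by k & 1.

-- termination lemma for A's loop port (cited in decreasing_by)
theorem pvShiftOne (m : Int) : m >>> (1 : Nat) = m / 2 := by
  rw [Int.shiftRight_eq_div_pow]; norm_num

theorem pvHalf_lt (m : Int) (h2 : (2:Int) ∣ m) (h0 : m ≠ 0) :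
    (m >>> (1 : Nat)).natAbs < m.natAbs := by
  rw [pvShiftOne]; omega

-- ===== PORT A =====
def J_getPowTwoVal_A (n : Int) : Int :=
  if PySem.Int.mod n 8 = 3 ∨ PySem.Int.mod n 8 = 5 then -1 else 1

-- A's while loop: `while m & 1 == 0: m = m >> 1; k += 1`.
-- The extra `m ≠ 0` guard only makes the recursion total: on m = 0 Python never
-- terminates, and Pre_ excludes m = 0.
def pyLoopA (m : Int) (k : Int) : Int × Int :=
  if h : PySem.Int.band m 1 = 0 ∧ m ≠ 0 then
    pyLoopA (m >>> (1 : Nat)) (k + 1)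
  else (m, k)
termination_by m.natAbs
decreasing_by
  exact pvHalf_lt m ((PySem.Int.mod_eq_zero_iff_dvd m 2).mp (by rw [← PySem.Int.band_one]; exact h.1)) h.2

def J_reducePowTwo (j : Int × Int × Int) : Int × Int × Int :=
  match j with
  | (sign, m, n) =>
    let mk := pyLoopA m 0
    if PySem.Int.mod mk.2 2 = 0 then (sign, mk.1, n)
    else (J_getPowTwoVal_A n * sign, mk.1, n)

-- ===== PORT B =====
def J_getPowTwoVal_B (n : Int) : Int :=
  if PySem.Int.mod n 8 = 3 ∨ PySem.Int.mod n 8 = 5 then -1 else 1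

-- `(m & -m).bit_length() - 1`, then `m >>= k`, then `if k & 1:`.
-- `m >>> k.toNat` is exact for k ≥ 0; k = -1 happens only for m = 0, where
-- Python raises ValueError on the negative shift — excluded by Pre_.
def J_reducePowTwo_alt (j : Int × Int × Int) : Int × Int × Int :=
  match j with
  | (sign, m, n) =>
    let k : Int := (PySem.Int.bitLength (PySem.Int.band m (-m)) : Int) - 1
    let m2 := m >>> k.toNat
    if PySem.Int.band k 1 ≠ 0 then (J_getPowTwoVal_B n * sign, m2, n)
    else (sign, m2, n)

-- ===== PRECONDITION & SPEC =====
-- Pre_ excludes m = 0 only: there A's while loop never terminates (and B's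
-- negative shift raises ValueError).
def Pre_J_reducePowTwo (j : Int × Int × Int) : Prop := j.2.1 ≠ 0
instance (j : Int × Int × Int) : Decidable (Pre_J_reducePowTwo j) := by unfold Pre_J_reducePowTwo; infer_instance

def pvWitness_J_reducePowTwo : (Int × Int × Int) := (1, 12, 7)

def Spec_J_reducePowTwo (j : Int × Int × Int) (out : Int × Int × Int) : Prop := out = J_reducePowTwo_alt j
instance (j : Int × Int × Int) (out : Int × Int × Int) : Decidable (Spec_J_reducePowTwo j out) := by unfold Spec_J_reducePowTwo; infer_instance

-- ===== CLAIM (what is proved, stated in full; the proofs are below) =====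
def Claim_equal_J_reducePowTwo : Prop := ∀ (j : Int × Int × Int), Dom_J_reducePowTwo j → Pre_J_reducePowTwo j → Spec_J_reducePowTwo j (J_reducePowTwo j)

-- ===== LEMMAS AND PROOFS =====

-- (a &&& b) / 2 = a/2 &&& b/2 on Nat, the halving step for the bit lemmas below
theorem pvAndDivTwo (a b : Nat) : (a &&& b) / 2 = a / 2 &&& b / 2 := by
  apply Nat.eq_of_testBit_eq
  intro k
  rw [← Nat.testBit_succ, Nat.testBit_and, Nat.testBit_succ, Nat.testBit_succ, ← Nat.testBit_and]

-- odd x: x &&& (x-1) = x - 1, so x - (x &&& (x-1)) = 1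
theorem pvAndPredOdd (x : Nat) (h : x % 2 = 1) : x &&& (x - 1) = x - 1 := by
  apply Nat.eq_of_testBit_eq
  intro k
  cases k with
  | zero => rw [Nat.testBit_and]; simp [Nat.testBit_zero]; omega
  | succ k =>
    have hd : x / 2 = (x - 1) / 2 := by omega
    rw [Nat.testBit_succ, Nat.testBit_succ, pvAndDivTwo, hd, Nat.and_self]

-- even: the lowest set bit of 2y is twice that of y
theorem pvAndPredEven (y : Nat) (h : 0 < y) : (2*y) &&& (2*y - 1) = 2 * (y &&& (y - 1)) := by
  apply Nat.eq_of_testBit_eq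
  intro k
  cases k with
  | zero =>
    rw [Nat.testBit_and]
    simp [Nat.testBit_zero, Nat.mul_mod_right]
  | succ k =>
    have h1 : (2*y) / 2 = y := by omega
    have h2 : (2*y - 1) / 2 = y - 1 := by omega
    have h3 : (2 * (y &&& (y - 1))) / 2 = y &&& (y - 1) := by omega
    rw [Nat.testBit_succ, Nat.testBit_succ, pvAndDivTwo, h1, h2, h3]

-- Python's m & -m in terms of |m|: both sign cases collapse to x - (x &&& (x-1))
theorem pvLowbit (m : Int) (h : m ≠ 0) :
    PySem.Int.band m (-m) = ((m.natAbs - (m.natAbs &&& (m.natAbs - 1)) : Nat) : Int) := by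
  rcases lt_or_gt_of_ne h with hneg | hpos
  · simp only [PySem.Int.band]
    rw [if_neg (by omega), if_pos (by omega)]
    congr 2
    · omega
    · congr 1 <;> omega
  · simp only [PySem.Int.band]
    rw [if_pos (by omega), if_neg (by omega)]
    congr 2
    · omega
    · congr 1 <;> omega

-- bitLength of an Int power of two
theorem pvBitLengthPow (v : Nat) : PySem.Int.bitLength ((2^v : Nat) : Int) = v + 1 := by
  induction v with
  | zero => decide
  | succ v ih =>
    rw [PySem.Int.bitLength_of_pos (by positivity)]
    have : PySem.Int.floordiv ((2^(v+1) : Nat) : Int) 2 = ((2^v : Nat) : Int) := by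
      rw [PySem.Int.floordiv_eq_ediv_of_pos (by norm_num)]
      push_cast [pow_succ]
      omega
    rw [this, ih]

-- core characterisation: for m ≠ 0, m & -m is the power of two 2^v where v is
-- exactly the number of iterations of A's loop, and A's loop shifts m by v
theorem pvLoopChar (m : Int) (h0 : m ≠ 0) :
    ∃ v : Nat, PySem.Int.band m (-m) = ((2^v : Nat) : Int) ∧
      ∀ k : Int, pyLoopA m k = (m >>> v, k + v) := by
  obtain ⟨N, hN⟩ : ∃ N, m.natAbs ≤ N := ⟨m.natAbs, le_rfl⟩
  induction N generalizing m with
  | zero => omega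
  | succ N ih =>
    have hband1 : PySem.Int.band m 1 = m % 2 := by
      rw [PySem.Int.band_one, PySem.Int.mod_eq_emod_of_pos (by norm_num)]
    by_cases h2 : m % 2 = 0
    · -- even: recurse on m / 2
      have hstep : m >>> (1 : Nat) = m / 2 := pvShiftOne m
      have hq0 : m / 2 ≠ 0 := by omega
      obtain ⟨v, hv1, hv2⟩ := ih (m / 2) hq0 (by omega)
      refine ⟨v + 1, ?_, ?_⟩
      · -- band doubles
        have hx : m.natAbs = 2 * (m / 2).natAbs := by omega
        rw [pvLowbit m h0, pvLowbit (m / 2) hq0] at *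
        rw [hx, pvAndPredEven (m / 2).natAbs (by omega)]
        have hle : (m / 2).natAbs &&& ((m / 2).natAbs - 1) ≤ (m / 2).natAbs :=
          Nat.and_le_left
        push_cast [pow_succ] at *
        omega
      · intro k
        rw [pyLoopA, dif_pos ⟨by rw [hband1]; exact h2, h0⟩, hstep, hv2 (k + 1),
           Prod.mk.injEq]
        constructor
        · -- m >>> (v+1) = (m/2) >>> v
          rw [Int.shiftRight_eq_div_pow, Int.shiftRight_eq_div_pow,
             Int.ediv_ediv_of_nonneg (by omega), pow_succ, mul_comm]
          push_cast
          ring_nf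
        · push_cast; ring
    · -- odd: loop stops, band is 1
      refine ⟨0, ?_, ?_⟩
      · rw [pvLowbit m h0, pvAndPredOdd m.natAbs (by omega)]
        have : 0 < m.natAbs := by omega
        push_cast
        omega
      · intro k
        rw [pyLoopA, dif_neg (by rw [hband1]; intro hc; exact h2 hc.1)]
        simp [Int.shiftRight_eq_div_pow]

-- ===== VERDICT (by name: the statement is the Claim_ definition above) =====
theorem J_reducePowTwo_spec : Claim_equal_J_reducePowTwo := by
  intro j _hdom hpre
  obtain ⟨s, m, n⟩ := j
  have h0 : m ≠ 0 := hpre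
  obtain ⟨v, hband, hloop⟩ := pvLoopChar m h0
  unfold Spec_J_reducePowTwo J_reducePowTwo J_reducePowTwo_alt
  simp only [hloop 0, hband, pvBitLengthPow]
  have hk : ((v + 1 : Nat) : Int) - 1 = (v : Int) := by push_cast; ring
  rw [hk]
  have htn : ((v : Int)).toNat = v := by omega
  rw [htn]
  have hkb : PySem.Int.band (v : Int) 1 = (v % 2 : Nat) := by
    rw [PySem.Int.band_one, PySem.Int.mod_eq_emod_of_pos (by norm_num)]
    push_cast
    omega
  have hmod : PySem.Int.mod (0 + (v : Int)) 2 = (v % 2 : Nat) := by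
    rw [PySem.Int.mod_eq_emod_of_pos (by norm_num)]
    push_cast
    omega
  rw [hkb, hmod]
  rcases Nat.mod_two_eq_zero_or_one v with hv | hv
  · rw [hv]
    simp
  · rw [hv]
    norm_num [J_getPowTwoVal_A, J_getPowTwoVal_B]
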